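-- pv_equiv track=rewrite | github.com/summer5625/Mygit | 第八模块_算法和设计模式/算法/查找排序/5_排序练习.py | search
-- ===== SOURCE A (Python) =====
-- def search(li, val):
--     m = len(li)  # 二维数组的行数
--     n = len(li[0])  # 二维数组的列数
--
--     new_li = []
--     for i in li:
--         new_li.extend(i)
--     left = 0
--     right = len(new_li) - 1
--     while left <= right:
--         mid = (left + right) // 2
--         if new_li[mid] < val:
--             left = mid + 1
--         elif new_li[mid] > val:
--             right = mid - 1
--         elif new_li[mid] == val:
--             row = mid // m
--             column = mid % m
--             return (row, column)
--     else:
--         return None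
-- ===== SOURCE B (Python) =====
-- def search(li, val):
--     m = len(li)
--     flat = [x for row in li for x in row]
--
--     def bisect(xs, off):
--         # bisect the sublist xs, which sits at flat offset `off`
--         if not xs:
--             return None
--         k = (len(xs) - 1) // 2
--         x = xs[k]
--         if x < val:
--             return bisect(xs[k + 1:], off + k + 1)
--         if x > val:
--             return bisect(xs[:k], off)
--         i = off + k
--         return (i // m, i % m)
--
--     return bisect(flat, 0)
-- ===== Notes on version B (the rewrite author's own statement) =====
-- stated objective: alternative
-- what changed: B replaces A's indexed left/right bisection loop over a flattened copy with a recursive divide-and-conquer that bisects sublists directly (slice off the discarded half, carry only a flat offset), taking the same comparison path and so returning identical results.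
-- outside the precondition, e.g. on search([], 3): A raises IndexError, B returns None
import Mathlib
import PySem

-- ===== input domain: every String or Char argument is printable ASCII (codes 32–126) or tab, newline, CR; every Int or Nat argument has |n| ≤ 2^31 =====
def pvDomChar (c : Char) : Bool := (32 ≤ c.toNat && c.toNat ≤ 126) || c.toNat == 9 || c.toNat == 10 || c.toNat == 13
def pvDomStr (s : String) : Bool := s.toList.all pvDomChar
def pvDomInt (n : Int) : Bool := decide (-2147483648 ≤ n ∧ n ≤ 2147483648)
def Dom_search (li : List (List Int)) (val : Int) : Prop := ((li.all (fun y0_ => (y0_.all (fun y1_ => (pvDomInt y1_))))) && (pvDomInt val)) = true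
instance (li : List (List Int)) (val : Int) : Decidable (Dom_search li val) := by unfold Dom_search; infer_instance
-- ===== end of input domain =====

-- B swaps A's indexed left/right bisection loop for a divide-and-conquer that slices
-- sublists and carries a flat offset; same comparison path, same results (objective: alternative).

-- ===== PORT A =====
-- while left <= right: … (literal loop body; the none-arm of the match is Python's IndexError, unreachable here)
def searchLoopA (new_li : List Int) (m val : Int) (left right : Int) : Option (List Int) :=
  if h : left ≤ right then
    let mid := PySem.Int.floordiv (left + right) 2
    match PySem.List.pyGet? new_li mid with
    | none => none
    | some x =>
      if x < val then searchLoopA new_li m val (mid + 1) right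
      else if x > val then searchLoopA new_li m val left (mid - 1)
      else some [PySem.Int.floordiv mid m, PySem.Int.mod mid m]
  else none
termination_by (right + 1 - left).toNat
decreasing_by
  · have hb := PySem.Int.floordiv_two_mid_bounds (lo := left) (hi := right) h
    omega
  · have hb := PySem.Int.floordiv_two_mid_bounds (lo := left) (hi := right) h
    omega

def search (li : List (List Int)) (val : Int) : Option (List Int) :=
  -- 'n = len(li[0])' raises IndexError on an empty li: the none-arm is outside Pre_search
  match PySem.List.pyGet? li 0 with
  | none => none
  | some _ =>
    let m : Int := li.length
    let new_li := li.foldl (fun acc row => acc ++ row) ([] : List Int)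
    searchLoopA new_li m val 0 ((new_li.length : Int) - 1)

-- ===== PORT B =====
-- bisect(xs, off): recursive bisection on the sublist itself; xs[k] via pyGet? (none-arm
-- unreachable since k < len xs); slices xs[k+1:] / xs[:k] have nonnegative bounds, so they
-- are exactly List.drop / List.take (PySem.List.slice_from_natCast / slice_to_natCast).
def bisectB (val : Int) (m : Nat) (xs : List Int) (off : Nat) : Option (List Int) :=
  match xs with
  | [] => none
  | y :: rest =>
    let k := ((y :: rest).length - 1) / 2
    match PySem.List.pyGet? (y :: rest) (k : Int) with
    | none => none
    | some x =>
      if x < val then bisectB val m ((y :: rest).drop (k + 1)) (off + k + 1)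
      else if x > val then bisectB val m ((y :: rest).take k) off
      else some [((off + k) / m : Nat), (((off + k) % m : Nat) : Int)]
termination_by xs.length
decreasing_by
  all_goals (simp; try omega)

def search_alt (li : List (List Int)) (val : Int) : Option (List Int) :=
  let m : Nat := li.length
  let flat := li.flatMap (fun row => row)
  bisectB val m flat 0

-- ===== PRECONDITION & SPEC =====
-- A evaluates len(li[0]) and raises IndexError when the outer list is empty; Pre_ excludes exactly that.
def Pre_search (li : List (List Int)) (val : Int) : Prop := li ≠ []
instance (li : List (List Int)) (val : Int) : Decidable (Pre_search li val) := by unfold Pre_search; infer_instance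
def pvWitness_search : List (List Int) × Int := ([[1, 2], [3, 4]], 3)

def Spec_search (li : List (List Int)) (val : Int) (out : Option (List Int)) : Prop := out = search_alt li val
instance (li : List (List Int)) (val : Int) (out : Option (List Int)) : Decidable (Spec_search li val out) := by unfold Spec_search; infer_instance

-- ===== CLAIM (what is proved, stated in full; the proofs are below) =====
def Claim_equal_search : Prop := ∀ (li : List (List Int)) (val : Int), Dom_search li val → Pre_search li val → Spec_search li val (search li val)

-- ===== LEMMAS AND PROOFS =====
lemma foldl_append_eq_flatten (li : List (List Int)) :
    ∀ acc : List Int, li.foldl (fun acc row => acc ++ row) acc = acc ++ li.flatten := by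
  induction li with
  | nil => intro acc; simp [List.foldl]
  | cons r rest ih => intro acc; simp [List.foldl, ih]

-- A's loop on flat indices [off, off+len xs) equals B's recursion on the sublist xs at offset off
lemma loop_eq (flat : List Int) (m : Nat) (val : Int) :
    ∀ (n : Nat) (xs : List Int) (off : Nat), xs.length ≤ n →
      (∀ j, j < xs.length → xs[j]? = flat[off + j]?) →
      searchLoopA flat (m : Int) val (off : Int) ((off : Int) + (xs.length : Int) - 1)
        = bisectB val m xs off := by
  intro n
  induction n with
  | zero =>
    intro xs off hn hidx
    match xs, hn with
    | [], _ =>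
      rw [searchLoopA, bisectB]
      simp
  | succ n ih =>
    intro xs off hn hidx
    match xs with
    | [] =>
      rw [searchLoopA, bisectB]
      simp
    | y :: rest =>
      rw [searchLoopA, bisectB]
      have hlen1 : 1 ≤ (y :: rest).length := by simp
      have hle : (off : Int) ≤ (off : Int) + ((y :: rest).length : Int) - 1 := by
        push_cast; omega
      rw [dif_pos hle]
      -- the midpoint (substituted everywhere by simp only's zeta)
      set L := (y :: rest).length with hL
      have hmid : PySem.Int.floordiv ((off : Int) + ((off : Int) + (L : Int) - 1)) 2
          = ((off + (L - 1) / 2 : Nat) : Int) := by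
        rw [PySem.Int.floordiv_eq_ediv_of_pos (by omega)]; omega
      rw [hmid]
      simp only []
      have hLr : L = rest.length + 1 := by simp [hL]
      set k := (L - 1) / 2 with hk
      have hkL : k < L := by omega
      have hxk : (y :: rest)[k]? = flat[off + k]? := hidx k hkL
      have hgetB : PySem.List.pyGet? (y :: rest) (k : Int) = (y :: rest)[k]? :=
        PySem.List.pyGet?_natCast _ _
      have hgetA : PySem.List.pyGet? flat ((off + k : Nat) : Int) = flat[off + k]? :=
        PySem.List.pyGet?_natCast _ _
      have hsome : (y :: rest)[k]? = some ((y :: rest)[k]'hkL) := List.getElem?_eq_getElem hkL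
      rw [hgetA, ← hxk, hsome]
      simp only [hgetB, hsome]
      set x := (y :: rest)[k]'hkL with hx
      by_cases h1 : x < val
      · simp only [h1, if_true]
        have := ih ((y :: rest).drop (k + 1)) (off + k + 1)
          (by simp only [List.length_drop, List.length_cons]; omega)
          (by
            intro j hj
            rw [List.getElem?_drop]
            have := hidx (k + 1 + j) (by simp [List.length_drop] at hj; omega)
            rw [this]; congr 1; omega)
        rw [← this]
        congr 1 <;> (simp [List.length_drop]; omega)
      · by_cases h2 : x > val
        · simp only [h1, if_false, h2, if_true]
          have := ih ((y :: rest).take k) off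
            (by simp only [List.length_take, List.length_cons]; omega)
            (by
              intro j hj
              simp [List.length_take] at hj
              rw [List.getElem?_take_of_lt hj.1]
              exact hidx j (by omega))
          rw [← this]
          congr 1
          simp [List.length_take]; omega
        · simp only [h1, h2, if_false]
          have hcast : ((off + k : Nat) : Int) = ((off : Int) + (k : Int)) := by push_cast; ring
          rw [PySem.Int.floordiv_natCast, PySem.Int.mod_natCast]

-- ===== VERDICT (by name: the statement is the Claim_ definition above) =====
theorem search_spec : Claim_equal_search := by
  intro li val _dom hpre
  unfold Spec_search search search_alt
  match li, hpre with
  | r :: rest, _ =>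
    rw [PySem.List.pyGet?_zero_cons]
    simp only
    rw [foldl_append_eq_flatten]
    simp only [List.nil_append, List.flatMap_id']
    have h := loop_eq (r :: rest).flatten ((r :: rest).length) val
      (r :: rest).flatten.length (r :: rest).flatten 0 (le_refl _)
      (by intro j hj; simp)
    simpa using h
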